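-- pv_equiv track=rewrite | github.com/npremz/relay-judge | scripts/generate_subjects.py | unique_unicode_run
-- ===== SOURCE A (Python) =====
-- def unique_unicode_run(length: int, start: int = 0x0100) -> str:
--     chars: list[str] = []
--     codepoint = start
--
--     while len(chars) < length:
--         if 0xD800 <= codepoint <= 0xDFFF:
--             codepoint = 0xE000
--         chars.append(chr(codepoint))
--         codepoint += 1
--
--     return "".join(chars)
-- ===== SOURCE B (Python) =====
-- def unique_unicode_run(length: int, start: int = 0x0100) -> str:
--     if length <= 0:
--         return ""
--     s = 0xE000 if 0xD800 <= start <= 0xDFFF else start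
--     if s < 0xD800:
--         low = min(length, 0xD800 - s)
--         pre = [chr(c) for c in range(s, s + low)]
--         rem = length - low
--         post = [chr(c) for c in range(0xE000, 0xE000 + rem)] if rem > 0 else []
--         return "".join(pre + post)
--     return "".join(chr(c) for c in range(s, s + length))
-- ===== Notes on version B (the rewrite author's own statement) =====
-- stated objective: alternative
-- what changed: Replaces the per-character while loop with a surrogate check on every codepoint by arithmetic on at most two contiguous ranges (before the surrogate block and from 0xE000), materialised directly with range(); the per-item loop state and per-item branch disappear.
import Mathlib
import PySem

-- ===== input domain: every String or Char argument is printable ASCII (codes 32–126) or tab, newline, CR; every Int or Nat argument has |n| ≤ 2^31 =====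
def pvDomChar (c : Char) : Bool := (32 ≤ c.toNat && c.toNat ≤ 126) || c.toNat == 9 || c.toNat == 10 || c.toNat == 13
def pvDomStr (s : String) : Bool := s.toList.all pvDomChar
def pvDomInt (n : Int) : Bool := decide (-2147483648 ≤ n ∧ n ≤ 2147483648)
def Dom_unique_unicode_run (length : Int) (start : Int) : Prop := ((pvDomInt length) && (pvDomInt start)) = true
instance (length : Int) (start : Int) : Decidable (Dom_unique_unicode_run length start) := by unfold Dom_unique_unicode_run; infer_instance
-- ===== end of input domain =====

-- B replaces A's per-character while loop (surrogate test on every codepoint) by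
-- arithmetic on at most two contiguous codepoint ranges; same return value on Pre_.

-- ===== PORT A =====
-- the while loop: it runs exactly `length` iterations (one char appended each time)
def uurLoop : Nat → Int → List Char → List Char
  | 0, _, acc => acc
  | n+1, cp, acc =>
    let cp' := if 0xD800 ≤ cp ∧ cp ≤ 0xDFFF then (0xE000 : Int) else cp
    uurLoop n (cp' + 1) (acc ++ [Char.ofNat cp'.toNat])

def unique_unicode_run (length : Int) (start : Int) : String :=
  String.mk (uurLoop length.toNat start [])

-- ===== PORT B =====
-- [chr(c) for c in range(a, b)]
def uurRange (a b : Int) : List Char :=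
  (PySem.List.pyRange a b 1).map (fun c => Char.ofNat c.toNat)

def unique_unicode_run_alt (length : Int) (start : Int) : String :=
  if length ≤ 0 then "" else
  let s := if 0xD800 ≤ start ∧ start ≤ 0xDFFF then (0xE000 : Int) else start
  if s < 0xD800 then
    let low := min length (0xD800 - s)
    let pre := uurRange s (s + low)
    let rem := length - low
    let post := if rem > 0 then uurRange 0xE000 (0xE000 + rem) else []
    String.mk (pre ++ post)
  else String.mk (uurRange s (s + length))

-- ===== PRECONDITION & SPEC =====
-- Pre_ excludes exactly the inputs where Python's chr raises ValueError: length > 0 with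
-- a negative start, or a run whose last emitted codepoint would exceed 0x10FFFF.
def Pre_unique_unicode_run (length : Int) (start : Int) : Prop :=
  length ≤ 0 ∨ (0 ≤ start ∧
    (let s := if 0xD800 ≤ start ∧ start ≤ 0xDFFF then (0xE000 : Int) else start
     (if s < 0xD800 ∧ 0xD800 ≤ s + length - 1 then s + length - 1 + 0x800
      else s + length - 1) ≤ 0x10FFFF))
instance (length : Int) (start : Int) : Decidable (Pre_unique_unicode_run length start) := by
  unfold Pre_unique_unicode_run; infer_instance

def pvWitness_unique_unicode_run : Int × Int := (3, 0x100)

def Spec_unique_unicode_run (length : Int) (start : Int) (out : String) : Prop := out = unique_unicode_run_alt length start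
instance (length : Int) (start : Int) (out : String) : Decidable (Spec_unique_unicode_run length start out) := by unfold Spec_unique_unicode_run; infer_instance

-- ===== CLAIM (what is proved, stated in full; the proofs are below) =====
def Claim_equal_unique_unicode_run : Prop := ∀ (length : Int) (start : Int), Dom_unique_unicode_run length start → Pre_unique_unicode_run length start → Spec_unique_unicode_run length start (unique_unicode_run length start)

-- ===== LEMMAS AND PROOFS =====

theorem uurLoop_acc (n : Nat) : ∀ (cp : Int) (acc : List Char),
    uurLoop n cp acc = acc ++ uurLoop n cp [] := by
  induction n with
  | zero => intro cp acc; simp [uurLoop]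
  | succ n ih =>
    intro cp acc
    simp only [uurLoop]
    rw [ih _ (acc ++ _), ih _ ([] ++ _)]
    simp

theorem uurRange_nil (a b : Int) (h : b ≤ a) : uurRange a b = [] := by
  simp [uurRange, PySem.List.pyRange_one_eq_nil h]

theorem uurRange_cons (a b : Int) (h : a < b) :
    uurRange a b = Char.ofNat a.toNat :: uurRange (a + 1) b := by
  simp [uurRange, PySem.List.pyRange_one_cons h]

-- no surrogate is met: plain consecutive run
theorem uurLoop_plain (n : Nat) : ∀ cp : Int, (cp + n ≤ 0xD800 ∨ 0xE000 ≤ cp) →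
    uurLoop n cp [] = uurRange cp (cp + n) := by
  induction n with
  | zero => intro cp _; simp [uurLoop, uurRange_nil cp cp le_rfl]
  | succ n ih =>
    intro cp h
    have hns : ¬ (0xD800 ≤ cp ∧ cp ≤ 0xDFFF) := by omega
    simp only [uurLoop, if_neg hns]
    rw [uurLoop_acc, ih (cp + 1) (by omega)]
    rw [uurRange_cons cp (cp + (n + 1 : Nat)) (by push_cast; omega)]
    simp only [List.nil_append, List.singleton_append]
    congr 2
    push_cast
    ring

-- starting inside the surrogate block: jump to 0xE000 and run from there
theorem uurLoop_surr (n : Nat) (cp : Int) (h1 : 0xD800 ≤ cp) (h2 : cp ≤ 0xDFFF) :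
    uurLoop n cp [] = uurRange 0xE000 (0xE000 + n) := by
  cases n with
  | zero => simp [uurLoop, uurRange_nil]
  | succ n =>
    simp only [uurLoop, if_pos (And.intro h1 h2)]
    rw [uurLoop_acc, uurLoop_plain n (0xE000 + 1) (by omega)]
    rw [uurRange_cons 0xE000 _ (by push_cast; omega)]
    simp only [List.nil_append, List.singleton_append]
    congr 2
    push_cast
    ring

-- crossing the surrogate block: two ranges
theorem uurLoop_cross (n : Nat) : ∀ cp : Int, cp < 0xD800 → 0xD800 ≤ cp + n →
    uurLoop n cp [] = uurRange cp 0xD800 ++ uurRange 0xE000 (0xE000 + (cp + n - 0xD800)) := by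
  induction n with
  | zero => intro cp h1 h2; omega
  | succ n ih =>
    intro cp h1 h2
    have hns : ¬ (0xD800 ≤ cp ∧ cp ≤ 0xDFFF) := by omega
    simp only [uurLoop, if_neg hns]
    rw [uurLoop_acc]
    by_cases hc : cp + 1 < 0xD800
    · rw [ih (cp + 1) hc (by push_cast at h2 ⊢; omega)]
      rw [uurRange_cons cp 0xD800 h1]
      simp only [List.nil_append, List.cons_append]
      congr 3
      push_cast
      ring
    · have hcp : cp = 0xD800 - 1 := by omega
      rw [uurLoop_surr n (cp + 1) (by omega) (by omega)]
      rw [uurRange_cons cp 0xD800 h1, uurRange_nil (cp + 1) 0xD800 (by omega)]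
      simp only [List.nil_append, List.cons_append]
      congr 2
      push_cast
      omega

-- ===== VERDICT (by name: the statement is the Claim_ definition above) =====
theorem unique_unicode_run_spec : Claim_equal_unique_unicode_run := by
  intro length start _ _
  unfold Spec_unique_unicode_run unique_unicode_run unique_unicode_run_alt
  by_cases hl : length ≤ 0
  · have : length.toNat = 0 := by omega
    simp [this, hl, uurLoop]
    rfl
  · rw [if_neg hl]
    have hn : (length.toNat : Int) = length := by omega
    by_cases hsu : 0xD800 ≤ start ∧ start ≤ 0xDFFF
    · rw [if_pos hsu]
      simp only [if_neg (by omega : ¬ (0xE000 : Int) < 0xD800)]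
      rw [uurLoop_surr length.toNat start hsu.1 hsu.2, hn]
    · rw [if_neg hsu]
      by_cases hlt : start < 0xD800
      · rw [if_pos hlt]
        by_cases hcross : 0xD800 ≤ start + length
        · have hlow : min length (0xD800 - start) = 0xD800 - start := by omega
          rw [uurLoop_cross length.toNat start hlt (by omega), hlow]
          have hrem : length - (0xD800 - start) > 0 ∨ length - (0xD800 - start) = 0 := by omega
          rcases hrem with hr | hr
          · simp only [if_pos hr]
            congr 2
            · congr 1; omega
            · congr 1; omega
          · -- run ends exactly at 0xD800: the cross tail is empty and so is B's post
            simp only [if_neg (by omega : ¬ length - (0xD800 - start) > 0)]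
            rw [uurRange_nil 0xE000 (0xE000 + (start + (length.toNat : Int) - 0xD800)) (by omega)]
            rw [show start + ((55296 : Int) - start) = 55296 by ring]
        · have hlow : min length (0xD800 - start) = length := by omega
          rw [uurLoop_plain length.toNat start (by omega), hlow]
          simp only [if_neg (by omega : ¬ length - length > 0)]
          rw [hn]
          simp
      · rw [if_neg hlt]
        rw [uurLoop_plain length.toNat start (by omega), hn]
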